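-- pv_equiv track=rewrite | github.com/hy5guy/Master_Automation | scripts/validate_13_month_window.py | calculate_13_month_window_through
-- ===== SOURCE A (Python) =====
-- def calculate_13_month_window_through(end_year: int, end_month: int) -> tuple[str, str, list[str]]:
--     """
--     13 consecutive calendar months ending at end_year/end_month (inclusive), MM-YY labels.
--     Used when the report month is explicit (e.g. March 2026 ETL with February 2026 as last full month
--     or user-specified end).
--     """
--     periods_rev: list[str] = []
--     y, m = end_year, end_month
--     for _ in range(13):
--         periods_rev.append(f"{m:02d}-{str(y)[-2:]}")
--         if m == 1:
--             y -= 1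
--             m = 12
--         else:
--             m -= 1
--     periods = list(reversed(periods_rev))
--     return periods[0], periods[-1], periods
-- ===== SOURCE B (Python) =====
-- def calculate_13_month_window_through(end_year: int, end_month: int) -> tuple[str, str, list[str]]:
--     """13 consecutive calendar months ending at end_year/end_month (inclusive), MM-YY labels.
--     Each label is computed directly from its offset back from the end month: subtract the
--     offset and borrow a year when the month falls below January. Built in chronological
--     order, no threaded state, no reversal."""
--     periods: list[str] = []
--     for offset in range(12, -1, -1):
--         y, m = end_year, end_month - offset
--         if m < 1:
--             y, m = y - 1, m + 12
--         periods.append(f"{m:02d}-{str(y)[-2:]}")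
--     return periods[0], periods[-1], periods
-- ===== Notes on version B (the rewrite author's own statement) =====
-- stated objective: alternative
-- what changed: B replaces A's reverse-chronological state machine (threaded (y, m) with a December-wrap branch, then a final reversal) by a stateless forward loop computing each label directly from its offset back from the end month; Pre_ excludes end_month <= 0, which is not a calendar month and where A's no-wrap countdown labels are an accident of its implementation.
import Mathlib
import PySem

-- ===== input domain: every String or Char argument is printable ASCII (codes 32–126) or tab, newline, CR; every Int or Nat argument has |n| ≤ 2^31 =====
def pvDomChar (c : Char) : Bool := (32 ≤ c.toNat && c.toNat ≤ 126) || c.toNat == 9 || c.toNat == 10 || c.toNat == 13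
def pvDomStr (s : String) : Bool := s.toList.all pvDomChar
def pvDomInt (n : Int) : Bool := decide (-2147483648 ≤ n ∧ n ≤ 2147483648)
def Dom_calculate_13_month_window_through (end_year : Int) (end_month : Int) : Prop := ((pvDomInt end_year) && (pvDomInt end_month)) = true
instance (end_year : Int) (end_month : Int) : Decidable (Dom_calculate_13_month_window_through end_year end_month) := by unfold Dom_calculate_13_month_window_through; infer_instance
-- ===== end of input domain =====

-- B computes each of the 13 labels directly from its offset back from the end month
-- (stateless, built forward, no reversal) instead of A's reverse countdown state machine.


-- ===== PORT A =====
-- f"{m:02d}-{str(y)[-2:]}"  (zero-pad to width 2 — Python pads AFTER the sign, and any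
-- negative int already prints with ≥ 2 characters, so the length test is exact)
def pvLabel (y : Int) (m : Int) : String :=
  (if (PySem.Int.toChars m).length < 2 then "0" ++ PySem.Int.toStr m else PySem.Int.toStr m)
  ++ "-" ++ String.ofList (PySem.List.slice (PySem.Int.toChars y) (some (-2)) none)

-- the 'for _ in range(13)' countdown loop of A, threading (y, m, periods_rev)
def pvALoop : Nat → Int → Int → List String → List String
  | 0, _, _, acc => acc
  | Nat.succ k, y, m, acc =>
    if m = 1 then pvALoop k (y - 1) 12 (acc ++ [pvLabel y m])
    else pvALoop k y (m - 1) (acc ++ [pvLabel y m])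

def calculate_13_month_window_through (end_year : Int) (end_month : Int) : String × String × List String :=
  let periods := (pvALoop 13 end_year end_month []).reverse
  (PySem.List.pyGetD periods 0 "", PySem.List.pyGetD periods (-1) "", periods)

-- ===== PORT B =====
-- the loop body of B: the label 'offset' months before the end month
def pvBLabel (end_year : Int) (end_month : Int) (offset : Int) : String :=
  let y := end_year
  let m := end_month - offset
  let ym := if m < 1 then (y - 1, m + 12) else (y, m)
  pvLabel ym.1 ym.2

def calculate_13_month_window_through_alt (end_year : Int) (end_month : Int) : String × String × List String :=
  let periods := (PySem.List.pyRange 12 (-1) (-1)).foldl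
    (fun acc offset => acc ++ [pvBLabel end_year end_month offset]) []
  (PySem.List.pyGetD periods 0 "", PySem.List.pyGetD periods (-1) "", periods)

-- ===== PRECONDITION & SPEC =====
-- Pre_ excludes end_month ≤ 0 (not a calendar month), on which A still returns but its
-- no-wrap countdown labels are an accident of its implementation; B borrows a year there.
def Pre_calculate_13_month_window_through (end_year : Int) (end_month : Int) : Prop := 1 ≤ end_month
instance (end_year : Int) (end_month : Int) : Decidable (Pre_calculate_13_month_window_through end_year end_month) := by unfold Pre_calculate_13_month_window_through; infer_instance
def pvWitness_calculate_13_month_window_through : Int × Int := (2026, 3)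
def Spec_calculate_13_month_window_through (end_year : Int) (end_month : Int) (out : String × String × List String) : Prop := out = calculate_13_month_window_through_alt end_year end_month
instance (end_year : Int) (end_month : Int) (out : String × String × List String) : Decidable (Spec_calculate_13_month_window_through end_year end_month out) := by unfold Spec_calculate_13_month_window_through; infer_instance

-- ===== CLAIM (what is proved, stated in full; the proofs are below) =====
def Claim_equal_calculate_13_month_window_through : Prop := ∀ (end_year : Int) (end_month : Int), Dom_calculate_13_month_window_through end_year end_month → Pre_calculate_13_month_window_through end_year end_month → Spec_calculate_13_month_window_through end_year end_month (calculate_13_month_window_through end_year end_month)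

-- ===== LEMMAS AND PROOFS =====

-- closed form for A's state at step j of the countdown (valid while no second wrap occurs)
def pvStep (y : Int) (m : Int) (j : Nat) : String :=
  if (j : Int) < m ∨ m < 1 then pvLabel y (m - j) else pvLabel (y - 1) (m - j + 12)

theorem pv_aLoop_eq (k : Nat) (y m : Int) (acc : List String)
    (hk : m < 1 ∨ (k : Int) ≤ m + 12) :
    pvALoop k y m acc = acc ++ (List.range k).map (pvStep y m) := by
  induction k generalizing y m acc with
  | zero => simp [pvALoop]
  | succ k ih =>
    rw [List.range_succ_eq_map]
    simp only [List.map_cons, List.map_map]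
    by_cases hm : m = 1
    · subst hm
      show pvALoop k (y - 1) 12 (acc ++ [pvLabel y 1]) = _
      rw [ih (y - 1) 12 _ (by omega)]
      have hhead : pvStep y 1 0 = pvLabel y 1 := by
        simp only [pvStep, Nat.cast_zero]
        rw [if_pos (by omega)]
        norm_num
      have htail : (List.range k).map (pvStep y 1 ∘ Nat.succ)
          = (List.range k).map (pvStep (y - 1) 12) := by
        apply List.map_congr_left
        intro j hj
        rw [List.mem_range] at hj
        simp only [Function.comp, pvStep]
        rw [if_neg (by omega), if_pos (by omega)]
        congr 1
        omega
      rw [hhead, htail]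
      simp [List.append_assoc]
    · rw [pvALoop, if_neg hm, ih y (m - 1) _ (by omega)]
      have hhead : pvStep y m 0 = pvLabel y m := by
        simp only [pvStep, Nat.cast_zero]
        rw [if_pos (by omega)]
        norm_num
      have htail : (List.range k).map (pvStep y m ∘ Nat.succ)
          = (List.range k).map (pvStep y (m - 1)) := by
        apply List.map_congr_left
        intro j hj
        simp only [Function.comp, pvStep]
        by_cases hc : ((j + 1 : Nat) : Int) < m ∨ m < 1
        · rw [if_pos hc, if_pos (by omega)]
          congr 1
          omega
        · rw [if_neg hc, if_neg (by omega)]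
          congr 1
          omega
      rw [hhead, htail]
      simp [List.append_assoc]

theorem pv_lists_eq (y m : Int) (hm : 1 ≤ m) :
    ((List.range 13).map (pvStep y m)).reverse
      = (PySem.List.pyRange 12 (-1) (-1)).foldl
          (fun acc offset => acc ++ [pvBLabel y m offset]) [] := by
  rw [PySem.List.foldl_append_singleton_eq_map, PySem.List.pyRange_neg_one]
  apply List.ext_getElem
  · simp
  · intro i hi1 hi2
    simp only [List.length_reverse, List.length_map, List.length_range] at hi1 hi2
    simp only [List.nil_append, List.getElem_reverse, List.getElem_map, List.getElem_range,
      List.length_map, List.length_range]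
    simp only [pvStep, pvBLabel]
    by_cases hc : ((13 - 1 - i : Nat) : Int) < m ∨ m < 1
    · rw [if_pos hc, if_neg (by omega)]
      congr 1
      omega
    · rw [if_neg hc, if_pos (by omega)]
      congr 1
      omega

-- ===== VERDICT (by name: the statement is the Claim_ definition above) =====
theorem calculate_13_month_window_through_spec : Claim_equal_calculate_13_month_window_through := by
  intro y m _ hm
  show _ = _
  unfold calculate_13_month_window_through calculate_13_month_window_through_alt
  rw [pv_aLoop_eq 13 y m [] (by omega), List.nil_append, pv_lists_eq y m hm]
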